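-- pv_equiv track=rewrite | github.com/cyberdudebivash/CYBERDUDEBIVASH-THREAT-INTEL-PLATFORM | scripts/update_embedded_intel.py | find_embedded_intel_boundaries
-- ===== SOURCE A (Python) =====
-- def find_embedded_intel_boundaries(html: str) -> tuple:
--     """Find the exact byte boundaries of the EMBEDDED_INTEL array using brace matching.
--
--     Returns (array_start, array_end) where:
--         html[array_start] == '['  (opening bracket)
--         html[array_end - 1] == ']'  (closing bracket)
--
--     The replacement zone is html[array_start:array_end].
--     Everything before array_start and after array_end is UNTOUCHED.
--     """
--     # Step 1: Find the declaration
--     marker = "const EMBEDDED_INTEL = ["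
--     pos = html.find(marker)
--     if pos == -1:
--         return -1, -1
--
--     # Step 2: array_start is the '[' position
--     array_start = pos + len("const EMBEDDED_INTEL = ")
--     if array_start >= len(html) or html[array_start] != '[':
--         return -1, -1
--
--     # Step 3: Brace-match to find the closing ']'
--     depth = 0
--     i = array_start
--     in_string = False
--     escape = False
--
--     while i < len(html):
--         ch = html[i]
--
--         if escape:
--             escape = False
--             i += 1
--             continue
--
--         if ch == '\\' and in_string:
--             escape = True
--             i += 1
--             continue
--
--         if ch == '"' and not escape:
--             in_string = not in_string
--             i += 1
--             continue
--
--         if not in_string: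
--             if ch == '[':
--                 depth += 1
--             elif ch == ']':
--                 depth -= 1
--                 if depth == 0:
--                     array_end = i + 1  # Include the ']'
--                     return array_start, array_end
--
--         i += 1
--
--     return -1, -1
-- ===== SOURCE B (Python) =====
-- def find_embedded_intel_boundaries(html: str) -> tuple:
--     """Find EMBEDDED_INTEL array boundaries in two staged passes: first extract
--     the structural brackets (positions of '[' / ']' outside string literals),
--     then fold a depth counter over that token list."""
--     marker = "const EMBEDDED_INTEL = ["
--     pos = html.find(marker)
--     if pos == -1:
--         return -1, -1
--     array_start = pos + len("const EMBEDDED_INTEL = ")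
--     if array_start >= len(html) or html[array_start] != '[':
--         return -1, -1
--
--     # Pass 1: tokenize — keep only brackets that lie outside string literals
--     structural = []
--     n = len(html)
--     i = array_start
--     in_string = False
--     while i < n:
--         ch = html[i]
--         if in_string:
--             if ch == '\\':
--                 i += 2          # skip the escaped character
--                 continue
--             if ch == '"':
--                 in_string = False
--         else:
--             if ch == '"':
--                 in_string = True
--             elif ch == '[' or ch == ']':
--                 structural.append((i, ch))
--         i += 1
--
--     # Pass 2: brace-match over the bracket tokens only
--     depth = 0
--     for j, ch in structural:
--         if ch == '[':
--             depth += 1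
--         else:
--             depth -= 1
--             if depth == 0:
--                 return array_start, j + 1
--     return -1, -1
-- ===== Notes on version B (the rewrite author's own statement) =====
-- stated objective: alternative
-- what changed: Replaced A's single-pass state machine (depth/in_string/escape flags interleaved in one loop) with two staged passes: pass 1 tokenizes, extracting only the positions of brackets lying outside string literals; pass 2 folds a depth counter over that token list to locate the closing bracket of the array.
import Mathlib
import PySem

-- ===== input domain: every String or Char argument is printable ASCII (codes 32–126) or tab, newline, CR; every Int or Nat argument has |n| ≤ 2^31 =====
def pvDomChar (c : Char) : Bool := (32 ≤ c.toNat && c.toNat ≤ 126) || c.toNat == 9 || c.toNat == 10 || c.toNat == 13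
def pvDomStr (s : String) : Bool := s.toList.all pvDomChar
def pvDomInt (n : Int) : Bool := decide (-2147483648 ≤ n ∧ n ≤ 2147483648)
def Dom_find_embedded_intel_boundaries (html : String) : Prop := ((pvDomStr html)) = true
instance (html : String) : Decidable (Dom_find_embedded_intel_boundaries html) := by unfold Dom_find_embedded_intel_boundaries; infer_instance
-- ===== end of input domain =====

-- B replaces A's single-pass depth/in_string/escape state machine with two staged
-- passes (pass 1 extracts the out-of-string bracket tokens, pass 2 folds a depth
-- counter over them); objective: alternative decomposition, same cost.

-- ===== PORT A =====
-- A's while loop: structural recursion over the suffix of html starting at i,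
-- carrying the same state (i, depth, in_string, escape) as the Python.
def pvLoopA : List Char → Int → Int → Bool → Bool → Int → Int × Int
  | [], _, _, _, _, _ => (-1, -1)
  | ch :: rest, i, depth, in_string, escape, s =>
    if escape then pvLoopA rest (i + 1) depth in_string false s
    else if ch == '\\' && in_string then pvLoopA rest (i + 1) depth in_string true s
    else if ch == '"' && !escape then pvLoopA rest (i + 1) depth (!in_string) escape s
    else if !in_string then
      if ch == '[' then pvLoopA rest (i + 1) (depth + 1) in_string escape s
      else if ch == ']' then
        if depth - 1 = 0 then (s, i + 1)
        else pvLoopA rest (i + 1) (depth - 1) in_string escape s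
      else pvLoopA rest (i + 1) depth in_string escape s
    else pvLoopA rest (i + 1) depth in_string escape s

def find_embedded_intel_boundaries (html : String) : Int × Int :=
  let pos := PySem.Str.find html "const EMBEDDED_INTEL = ["
  if pos = -1 then (-1, -1)
  else
    let array_start := pos + PySem.Str.len "const EMBEDDED_INTEL = "
    if array_start ≥ PySem.Str.len html ∨ PySem.Str.pyGet? html array_start ≠ some '[' then
      (-1, -1)
    else
      pvLoopA (html.toList.drop array_start.toNat) array_start 0 false false array_start

-- ===== PORT B =====
-- B's pass 1: recursion over the suffix, carrying (i, in_string); emits the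
-- positions of brackets outside string literals (the 'structural' list).
def pvTokens : List Char → Int → Bool → List (Int × Char)
  | [], _, _ => []
  | c :: rest, i, instr =>
    if instr then
      if c == '\\' then
        match rest with
        | [] => []
        | _ :: r2 => pvTokens r2 (i + 2) true
      else if c == '"' then pvTokens rest (i + 1) false
      else pvTokens rest (i + 1) true
    else
      if c == '"' then pvTokens rest (i + 1) true
      else if c == '[' || c == ']' then (i, c) :: pvTokens rest (i + 1) false
      else pvTokens rest (i + 1) false

-- B's pass 2: fold the depth counter over the bracket tokens.
def pvMatch : List (Int × Char) → Int → Int → Int × Int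
  | [], _, _ => (-1, -1)
  | (j, c) :: rest, depth, s =>
    if c == '[' then pvMatch rest (depth + 1) s
    else
      if depth - 1 = 0 then (s, j + 1)
      else pvMatch rest (depth - 1) s

def find_embedded_intel_boundaries_alt (html : String) : Int × Int :=
  let pos := PySem.Str.find html "const EMBEDDED_INTEL = ["
  if pos = -1 then (-1, -1)
  else
    let array_start := pos + PySem.Str.len "const EMBEDDED_INTEL = "
    if array_start ≥ PySem.Str.len html ∨ PySem.Str.pyGet? html array_start ≠ some '[' then
      (-1, -1)
    else
      pvMatch (pvTokens (html.toList.drop array_start.toNat) array_start false) 0 array_start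

-- ===== PRECONDITION & SPEC =====
def Spec_find_embedded_intel_boundaries (html : String) (out : Int × Int) : Prop := out = find_embedded_intel_boundaries_alt html
instance (html : String) (out : Int × Int) : Decidable (Spec_find_embedded_intel_boundaries html out) := by unfold Spec_find_embedded_intel_boundaries; infer_instance

-- ===== CLAIM (what is proved, stated in full; the proofs are below) =====
def Claim_equal_find_embedded_intel_boundaries : Prop := ∀ (html : String), Dom_find_embedded_intel_boundaries html → Spec_find_embedded_intel_boundaries html (find_embedded_intel_boundaries html)

-- ===== LEMMAS AND PROOFS =====

-- unfolding lemma for pvMatch on a cons token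
theorem pvMatch_cons (j : Int) (c : Char) (rest : List (Int × Char)) (depth s : Int) :
    pvMatch ((j, c) :: rest) depth s =
      if c == '[' then pvMatch rest (depth + 1) s
      else if depth - 1 = 0 then (s, j + 1) else pvMatch rest (depth - 1) s := rfl

-- A's loop (escape clear, in either string state b) equals B's pass 2 folded over
-- B's pass-1 token list produced from the same suffix and state.
theorem pvLoopA_tokens : ∀ (n : Nat) (cs : List Char), cs.length ≤ n →
    ∀ (b : Bool) (i depth s : Int),
    pvLoopA cs i depth b false s = pvMatch (pvTokens cs i b) depth s := by
  intro n
  induction n with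
  | zero =>
    intro cs h b i depth s
    have : cs = [] := by cases cs <;> simp_all
    subst this; simp [pvLoopA, pvTokens, pvMatch]
  | succ n ih =>
    intro cs h b i depth s
    cases cs with
    | nil => simp [pvLoopA, pvTokens, pvMatch]
    | cons c rest =>
      have hrest : rest.length ≤ n := by simp at h; omega
      conv_rhs => rw [pvTokens.eq_def]
      cases b with
      | true =>
        by_cases hb : c = '\\'
        · subst hb
          cases rest with
          | nil => simp [pvLoopA, pvMatch]
          | cons d r2 =>
            have h2 : r2.length ≤ n := by simp at h; omega
            have e2 : i + 1 + 1 = i + 2 := by ring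
            simp only [pvLoopA]
            norm_num
            rw [e2, ih r2 h2 true (i + 2) depth s]
        · by_cases hq : c = '"'
          · subst hq
            simp only [pvLoopA]
            norm_num [hb]
            exact ih rest hrest false (i + 1) depth s
          · simp only [pvLoopA]
            norm_num [hb, hq]
            exact ih rest hrest true (i + 1) depth s
      | false =>
        by_cases hq : c = '"'
        · subst hq
          simp only [pvLoopA]
          norm_num
          exact ih rest hrest true (i + 1) depth s
        · by_cases hl : c = '['
          · subst hl
            simp only [pvLoopA]
            norm_num [pvMatch]
            exact ih rest hrest false (i + 1) (depth + 1) s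
          · by_cases hr : c = ']'
            · subst hr
              simp only [pvLoopA]
              norm_num
              simp only [if_neg hq, if_neg hl]
              rw [pvMatch_cons]
              norm_num
              split_ifs with hd
              · rfl
              · exact ih rest hrest false (i + 1) (depth - 1) s
            · simp only [pvLoopA]
              norm_num [hq, hl, hr]
              exact ih rest hrest false (i + 1) depth s

-- ===== VERDICT (by name: the statement is the Claim_ definition above) =====
theorem find_embedded_intel_boundaries_spec : Claim_equal_find_embedded_intel_boundaries := by
  intro html _
  unfold Spec_find_embedded_intel_boundaries
  unfold find_embedded_intel_boundaries find_embedded_intel_boundaries_alt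
  simp only
  split_ifs with h1 h2
  · rfl
  · rfl
  · exact pvLoopA_tokens _ _ le_rfl _ _ _ _
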